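-- pv_equiv track=rewrite | github.com/2448845600/LeetCodeDayDayUp | Kick Start题解/2019-H/1.py | get_hindex
-- ===== SOURCE A (Python) =====
-- def insort(a, x, lo=0, hi=None):
--     if lo < 0:
--         raise ValueError('lo must be non-negative')
--     if hi is None:
--         hi = len(a)
--     while lo < hi:
--         mid = (lo + hi) // 2
--         if x < a[mid]:
--             lo = mid + 1
--         else:
--             hi = mid
--     a.insert(lo, x)
--
-- def get_hindex(T, A):
--     sorted_list = []
--     pos = 0
--     hindex = []
--     for i in range(T):
--         insort(sorted_list, A[i])
--         if sorted_list[pos] >= pos + 1: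
--             pos += 1
--         hindex.append(pos)
--     return hindex
-- ===== SOURCE B (Python) =====
-- def get_hindex(T, A):
--     # Counting approach: cnt[c] = papers with exactly c citations seen so far,
--     # s = papers with citations >= h + 1; h can only grow by 1 per paper.
--     cnt = {}
--     h = 0
--     s = 0
--     out = []
--     for c in A[:max(0, T)]:
--         cnt[c] = cnt.get(c, 0) + 1
--         if c >= h + 1:
--             s += 1
--         if s >= h + 1:
--             h += 1
--             s -= cnt.get(h, 0)
--         out.append(h)
--     return out
-- ===== Notes on version B (the rewrite author's own statement) =====
-- stated objective: faster
-- what changed: A re-sorts by binary-search insertion into a list (O(T) shifting per paper); B keeps a citation counter dict and the running count s of papers with citations >= h+1, bumping h incrementally in O(1) per paper.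
import Mathlib
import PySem

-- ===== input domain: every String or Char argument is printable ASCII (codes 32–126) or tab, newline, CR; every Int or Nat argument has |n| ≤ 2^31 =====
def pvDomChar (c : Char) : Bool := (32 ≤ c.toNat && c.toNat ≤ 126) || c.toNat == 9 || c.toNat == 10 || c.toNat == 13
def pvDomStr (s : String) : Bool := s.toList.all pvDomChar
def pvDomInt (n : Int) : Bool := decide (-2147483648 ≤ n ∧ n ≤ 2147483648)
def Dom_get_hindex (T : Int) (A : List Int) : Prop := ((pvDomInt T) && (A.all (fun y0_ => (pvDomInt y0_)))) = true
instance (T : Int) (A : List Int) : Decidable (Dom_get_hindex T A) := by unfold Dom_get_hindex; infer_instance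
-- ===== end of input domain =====

-- B replaces A's O(T) binary-search list insertion per paper by an O(1) counter-bucket update (asymptotically faster).

-- ===== PORT A =====
-- insort's while-loop: lo/hi are always ≥ 0 in Python, so they are Nats here;
-- (lo+hi)/2 on Nat = Python's (lo+hi)//2 for nonnegative values (exact);
-- a.getD mid 0 = a[mid], exact because mid < hi ≤ a.length at every call.
def insortLoop (a : List Int) (x : Int) (lo hi : Nat) : Nat :=
  if _h : lo < hi then
    let mid := (lo + hi) / 2
    if x < a.getD mid 0 then insortLoop a x (mid + 1) hi
    else insortLoop a x lo mid
  else lo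
termination_by hi - lo
decreasing_by all_goals omega

def insortA (a : List Int) (x : Int) : List Int :=
  PySem.List.insert a ((insortLoop a x 0 a.length : Nat) : Int) x

-- the 'for i in range(T)' loop of get_hindex; pos ≥ 0 always, hence a Nat;
-- A.getD i 0 = A[i], exact because i < A.length under Pre_get_hindex.
def hLoop (A : List Int) (i fuel : Nat) (sl : List Int) (pos : Nat) (hx : List Int) : List Int :=
  match fuel with
  | 0 => hx
  | f + 1 =>
    let sl' := insortA sl (A.getD i 0)
    let pos' := if ((pos : Int) + 1) ≤ sl'.getD pos 0 then pos + 1 else pos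
    hLoop A (i + 1) f sl' pos' (hx ++ [((pos' : Nat) : Int)])

def get_hindex (T : Int) (A : List Int) : List Int :=
  hLoop A 0 T.toNat [] 0 []

-- ===== PORT B =====
-- Source B's loop: cnt is a Python dict (PySem.Dict), h and s are Python ints.
def hAltLoop : List Int → PySem.Dict Int Int → Int → Int → List Int → List Int
  | [], _, _, _, out => out
  | c :: rest, cnt, h, s, out =>
    let cnt' := cnt.insert c (cnt.getD c 0 + 1)
    let s1 := if h + 1 ≤ c then s + 1 else s
    let h' := if h + 1 ≤ s1 then h + 1 else h
    let s2 := if h + 1 ≤ s1 then s1 - cnt'.getD h' 0 else s1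
    hAltLoop rest cnt' h' s2 (out ++ [h'])

def get_hindex_alt (T : Int) (A : List Int) : List Int :=
  hAltLoop (PySem.List.slice A none (some (max 0 T))) PySem.Dict.empty 0 0 []

-- ===== PRECONDITION & SPEC =====
-- Pre_ excludes exactly the inputs where A raises IndexError (the loop reads A[i] for i < T).
def Pre_get_hindex (T : Int) (A : List Int) : Prop := T ≤ (A.length : Int)
instance (T : Int) (A : List Int) : Decidable (Pre_get_hindex T A) := by
  unfold Pre_get_hindex; infer_instance

def pvWitness_get_hindex : Int × List Int := (3, [1, 5, 2])

def Spec_get_hindex (T : Int) (A : List Int) (out : List Int) : Prop := out = get_hindex_alt T A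
instance (T : Int) (A : List Int) (out : List Int) : Decidable (Spec_get_hindex T A out) := by unfold Spec_get_hindex; infer_instance

-- ===== CLAIM (what is proved, stated in full; the proofs are below) =====
def Claim_equal_get_hindex : Prop := ∀ (T : Int) (A : List Int), Dom_get_hindex T A → Pre_get_hindex T A → Spec_get_hindex T A (get_hindex T A)

-- ===== LEMMAS AND PROOFS =====

def cge (l : List Int) (v : Int) : Nat := l.countP (fun c => decide (v ≤ c))

def mkOut : List Int → List Int → Nat → List Int
  | [], _, _ => []
  | c :: rest, done, p =>
    let done' := done ++ [c]
    let p' := if (p : Int) + 1 ≤ (cge done' ((p : Int) + 1) : Int) then p + 1 else p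
    ((p' : Nat) : Int) :: mkOut rest done' p'

lemma cge_split (l : List Int) (v : Int) : cge l v = l.count v + cge l (v + 1) := by
  induction l with
  | nil => rfl
  | cons c rest ih =>
    simp only [cge, List.countP_cons, List.count_cons] at *
    rcases lt_trichotomy c v with h | h | h
    · simp [show ¬ (v ≤ c) by omega, show ¬ (v+1 ≤ c) by omega, show c ≠ v by omega, ih]
    · subst h; simp [show ¬ (c+1 ≤ c) by omega, ih]; omega
    · simp [h.le, show v+1 ≤ c by omega, show c ≠ v by omega, ih]
      omega

lemma sorted_getD_iff (l : List Int) (hl : l.Pairwise (· ≥ ·)) (pos : Nat)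
    (hp : pos < l.length) (v : Int) :
    (v ≤ l.getD pos 0) ↔ pos + 1 ≤ cge l v := by
  have hpw := (List.pairwise_iff_getElem).mp hl
  have hgd : l.getD pos 0 = l[pos] := List.getD_eq_getElem l 0 hp
  rw [hgd]
  constructor
  · intro hv
    have h1 : cge (l.take (pos+1)) v = (l.take (pos+1)).length := by
      apply List.countP_eq_length.mpr
      intro y hy
      obtain ⟨i, hi, rfl⟩ := List.mem_take_iff_getElem.mp hy
      have hi' : i ≤ pos := by omega
      have : l[pos] ≤ l[i] := by
        rcases Nat.lt_or_ge i pos with h | h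
        · exact hpw i pos (by omega) hp h
        · have : i = pos := by omega
          simp [this]
      simp; omega
    have h2 : cge l v = cge (l.take (pos+1)) v + cge (l.drop (pos+1)) v := by
      rw [cge, cge, cge, ← List.countP_append, List.take_append_drop]
    have h3 : (l.take (pos+1)).length = pos+1 := by simp; omega
    omega
  · intro hc
    by_contra hv
    push Not at hv
    have h0 : cge (l.drop pos) v = 0 := by
      apply List.countP_eq_zero.mpr
      intro y hy
      obtain ⟨i, hi, rfl⟩ := List.mem_iff_getElem.mp hy
      have hpi : pos + i < l.length := by simp at hi; omega
      rw [show (List.drop pos l)[i] = l[pos+i] from (List.getElem_drop' ..).symm]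
      have : l[pos + i] ≤ l[pos] := by
        rcases Nat.eq_or_lt_of_le (Nat.le_add_right pos i) with h | h
        · simp [← h]
        · exact hpw pos (pos+i) hp hpi h
      simp; omega
    have h2 : cge l v = cge (l.take pos) v + cge (l.drop pos) v := by
      rw [cge, cge, cge, ← List.countP_append, List.take_append_drop]
    have h3 : cge (l.take pos) v ≤ (l.take pos).length := List.countP_le_length
    have h4 : (l.take pos).length ≤ pos := by simp
    omega

lemma insortLoop_spec (a : List Int) (x : Int) (ha : a.Pairwise (· ≥ ·)) :
    ∀ lo hi, lo ≤ hi → hi ≤ a.length →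
    (∀ j (hj : j < a.length), j < lo → x < a[j]) →
    (∀ j (hj : j < a.length), hi ≤ j → a[j] ≤ x) →
    lo ≤ insortLoop a x lo hi ∧ insortLoop a x lo hi ≤ hi ∧
    (∀ j (hj : j < a.length), j < insortLoop a x lo hi → x < a[j]) ∧
    (∀ j (hj : j < a.length), insortLoop a x lo hi ≤ j → a[j] ≤ x) := by
  have hpw := (List.pairwise_iff_getElem).mp ha
  suffices H : ∀ d lo hi, hi - lo = d → lo ≤ hi → hi ≤ a.length →
      (∀ j (hj : j < a.length), j < lo → x < a[j]) →
      (∀ j (hj : j < a.length), hi ≤ j → a[j] ≤ x) →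
      lo ≤ insortLoop a x lo hi ∧ insortLoop a x lo hi ≤ hi ∧
      (∀ j (hj : j < a.length), j < insortLoop a x lo hi → x < a[j]) ∧
      (∀ j (hj : j < a.length), insortLoop a x lo hi ≤ j → a[j] ≤ x) by
    intro lo hi h1 h2 h3 h4; exact H (hi - lo) lo hi rfl h1 h2 h3 h4
  intro d
  induction d using Nat.strong_induction_on with
  | _ d ih =>
    intro lo hi hd h1 h2 h3 h4
    rw [insortLoop]
    by_cases h : lo < hi
    · simp only [h, dif_pos]
      have hmid1 : lo ≤ (lo + hi) / 2 := by omega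
      have hmid2 : (lo + hi) / 2 < hi := by omega
      have hmlen : (lo + hi) / 2 < a.length := by omega
      have hgd : a.getD ((lo + hi) / 2) 0 = a[(lo + hi) / 2] := List.getD_eq_getElem a 0 hmlen
      rw [hgd]
      by_cases hx : x < a[(lo + hi) / 2]
      · simp only [hx, if_pos]
        have := ih (hi - ((lo + hi) / 2 + 1)) (by omega) ((lo + hi) / 2 + 1) hi rfl (by omega) h2
          (by
            intro j hj hjlt
            rcases Nat.lt_or_ge j lo with hc | hc
            · exact h3 j hj hc
            · have : a[j] ≥ a[(lo + hi) / 2] := by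
                rcases Nat.eq_or_lt_of_le (show j ≤ (lo+hi)/2 by omega) with he | hlt
                · simp [he]
                · exact hpw j ((lo+hi)/2) hj hmlen hlt
              omega)
          h4
        exact ⟨by omega, by omega, this.2.2.1, this.2.2.2⟩
      · simp only [hx, if_neg, not_false_iff]
        have := ih ((lo + hi) / 2 - lo) (by omega) lo ((lo + hi) / 2) rfl (by omega) (by omega) h3
          (by
            intro j hj hjge
            have : a[j] ≤ a[(lo + hi) / 2] := by
              rcases Nat.eq_or_lt_of_le hjge with he | hlt
              · simp [← he]
              · exact hpw ((lo+hi)/2) j hmlen hj hlt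
            omega)
        exact ⟨this.1, by omega, this.2.2.1, this.2.2.2⟩
    · simp only [h, dif_neg, not_false_iff]
      exact ⟨le_refl _, by omega, fun j hj hjl => h3 j hj hjl, fun j hj hjl => h4 j hj (by omega)⟩

lemma insortA_eq (a : List Int) (x : Int) (ha : a.Pairwise (· ≥ ·)) :
    insortA a x = a.take (insortLoop a x 0 a.length) ++ x :: a.drop (insortLoop a x 0 a.length) := by
  have hr : insortLoop a x 0 a.length ≤ a.length :=
    (insortLoop_spec a x ha 0 a.length (Nat.zero_le _) le_rfl (by omega) (by omega)).2.1
  exact PySem.List.insert_natCast a _ x hr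

lemma insortA_perm (a : List Int) (x : Int) (ha : a.Pairwise (· ≥ ·)) :
    (insortA a x).Perm (x :: a) := by
  rw [insortA_eq a x ha]
  calc (a.take _ ++ x :: a.drop _).Perm (x :: (a.take _ ++ a.drop _)) := List.perm_middle
    _ = x :: a := by rw [List.take_append_drop]

lemma insortA_sorted (a : List Int) (x : Int) (ha : a.Pairwise (· ≥ ·)) :
    (insortA a x).Pairwise (· ≥ ·) := by
  obtain ⟨-, hr, P1, P2⟩ := insortLoop_spec a x ha 0 a.length (Nat.zero_le _) le_rfl
    (by omega) (by omega)
  rw [insortA_eq a x ha]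
  set r := insortLoop a x 0 a.length with hrdef
  have hmem_take : ∀ y ∈ a.take r, x < y := by
    intro y hy
    obtain ⟨i, hi, rfl⟩ := List.mem_take_iff_getElem.mp hy
    exact P1 i (by omega) (by omega)
  have hmem_drop : ∀ y ∈ a.drop r, y ≤ x := by
    intro y hy
    obtain ⟨i, hi, rfl⟩ := List.mem_iff_getElem.mp hy
    rw [show (List.drop r a)[i] = a[r+i]'(by simp at hi; omega) from (List.getElem_drop' ..).symm]
    exact P2 (r+i) (by simp at hi; omega) (by omega)
  apply List.pairwise_append.mpr
  refine ⟨ha.sublist (List.take_sublist r a), ?_, ?_⟩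
  · apply List.pairwise_cons.mpr
    exact ⟨fun y hy => hmem_drop y hy, ha.sublist (List.drop_sublist r a)⟩
  · intro u hu v hv
    rcases List.mem_cons.mp hv with rfl | hv'
    · exact le_of_lt (hmem_take u hu)
    · have := hmem_drop v hv'
      have := hmem_take u hu
      omega

lemma cge_append_singleton (l : List Int) (c v : Int) :
    cge (l ++ [c]) v = cge l v + (if v ≤ c then 1 else 0) := by
  simp [cge, List.countP_append, List.countP_cons]

lemma hLoop_eq (A : List Int) :
    ∀ (f i : Nat) (done sl : List Int) (pos : Nat) (hx : List Int),
    i = done.length → i + f ≤ A.length → sl.Perm done → sl.Pairwise (· ≥ ·) → pos ≤ i →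
    hLoop A i f sl pos hx = hx ++ mkOut ((A.drop i).take f) done pos := by
  intro f
  induction f with
  | zero => intro i done sl pos hx _ _ _ _ _; simp [hLoop, mkOut]
  | succ f ih =>
    intro i done sl pos hx hlen hfit hperm hsort hpos
    have hi : i < A.length := by omega
    have hx0 : A.getD i 0 = A[i] := List.getD_eq_getElem A 0 hi
    have hdrop : A.drop i = A[i] :: A.drop (i + 1) := List.drop_eq_getElem_cons hi
    rw [hLoop]
    simp only [hx0]
    set c := A[i] with hc
    have hperm' : (insortA sl c).Perm (done ++ [c]) :=
      ((insortA_perm sl c hsort).trans (hperm.cons c)).trans (List.perm_append_singleton c done).symm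
    have hsort' : (insortA sl c).Pairwise (· ≥ ·) := insortA_sorted sl c hsort
    have hlen' : (insortA sl c).length = i + 1 := by
      rw [hperm'.length_eq]; simp [← hlen]
    have hcge : ∀ v, cge (insortA sl c) v = cge (done ++ [c]) v := fun v => hperm'.countP_eq _
    have hcond : (((pos : Int) + 1) ≤ (insortA sl c).getD pos 0)
        ↔ ((pos : Int) + 1 ≤ (cge (done ++ [c]) ((pos : Int) + 1) : Int)) := by
      rw [sorted_getD_iff _ hsort' pos (by omega), hcge]
      omega
    rw [hdrop, List.take_succ_cons, mkOut]
    by_cases hb : ((pos : Int) + 1) ≤ (insortA sl c).getD pos 0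
    · rw [if_pos hb, if_pos (hcond.mp hb)]
      rw [ih (i+1) (done ++ [c]) (insortA sl c) (pos+1) _ (by simp [← hlen]) (by omega) hperm' hsort' (by omega)]
      simp
    · rw [if_neg hb, if_neg (fun hcc => hb (hcond.mpr hcc))]
      rw [ih (i+1) (done ++ [c]) (insortA sl c) pos _ (by simp [← hlen]) (by omega) hperm' hsort' (by omega)]
      simp

lemma hAltLoop_eq :
    ∀ (rest done : List Int) (p : Nat) (out : List Int) (cnt : PySem.Dict Int Int),
    (∀ v : Int, cnt.getD v 0 = (done.count v : Int)) →
    hAltLoop rest cnt (p : Int) ((cge done ((p : Int) + 1) : Nat) : Int) out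
    = out ++ mkOut rest done p := by
  intro rest
  induction rest with
  | nil => intro done p out cnt _; simp [hAltLoop, mkOut]
  | cons c rest ih =>
    intro done p out cnt hcnt
    rw [hAltLoop, mkOut]
    have hcnt' : ∀ v : Int, (cnt.insert c (cnt.getD c 0 + 1)).getD v 0
        = ((done ++ [c]).count v : Int) := by
      intro v
      rw [PySem.Dict.getD_insert]
      by_cases hv : v = c
      · subst hv; simp [hcnt, List.count_append]
      · simp [hv, hcnt, List.count_append, Ne.symm hv]
    have hs1 : (if (p : Int) + 1 ≤ c then ((cge done ((p : Int) + 1) : Nat) : Int) + 1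
        else ((cge done ((p : Int) + 1) : Nat) : Int))
        = ((cge (done ++ [c]) ((p : Int) + 1) : Nat) : Int) := by
      rw [cge_append_singleton]
      split <;> simp_all
    rw [hs1]
    by_cases hb : (p : Int) + 1 ≤ ((cge (done ++ [c]) ((p : Int) + 1) : Nat) : Int)
    · simp only [if_pos hb]
      have hs2 : ((cge (done ++ [c]) ((p : Int) + 1) : Nat) : Int)
          - (cnt.insert c (cnt.getD c 0 + 1)).getD ((p : Int) + 1) 0
          = ((cge (done ++ [c]) (((p + 1 : Nat) : Int) + 1) : Nat) : Int) := by
        rw [hcnt']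
        have := cge_split (done ++ [c]) ((p : Int) + 1)
        push_cast
        push_cast at this
        omega
      rw [hs2, show (p : Int) + 1 = ((p + 1 : Nat) : Int) by push_cast; ring,
          ih (done ++ [c]) (p + 1) (out ++ [((p + 1 : Nat) : Int)]) _ hcnt']
      simp
    · simp only [if_neg hb]
      rw [ih (done ++ [c]) p (out ++ [(p : Int)]) _ hcnt']
      simp

lemma ports_agree (T : Int) (A : List Int) (hpre : T ≤ (A.length : Int)) :
    get_hindex T A = get_hindex_alt T A := by
  have hA : get_hindex T A = mkOut (A.take T.toNat) [] 0 := by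
    rw [get_hindex, hLoop_eq A T.toNat 0 [] [] 0 [] rfl (by omega) (List.Perm.refl [])
      List.Pairwise.nil (le_refl 0)]
    simp
  have hslice : PySem.List.slice A none (some (max 0 T)) = A.take T.toNat := by
    rw [show max 0 T = ((T.toNat : Nat) : Int) by rw [Int.ofNat_toNat, max_comm]]
    exact PySem.List.slice_to_natCast A T.toNat
  have hB : get_hindex_alt T A = mkOut (A.take T.toNat) [] 0 := by
    rw [get_hindex_alt, hslice]
    have := hAltLoop_eq (A.take T.toNat) [] 0 [] PySem.Dict.empty
      (by intro v; simp [PySem.Dict.getD_empty])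
    simpa [cge] using this
  rw [hA, hB]

-- ===== VERDICT (by name: the statement is the Claim_ definition above) =====
theorem get_hindex_spec : Claim_equal_get_hindex := by
  intro T A _ hpre
  unfold Spec_get_hindex
  exact ports_agree T A hpre
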